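-- pv_equiv track=rewrite | github.com/swablueme/snowsant-calculator | run.py | buy_result
-- ===== SOURCE A (Python) =====
-- buy_result_cache = {}
--
-- def buy_result(bid, me):
--     if (bid, me) in buy_result_cache:
--         return buy_result_cache[(bid, me)]
--     ranks = [sum([1 for y in bid if y > x]) for x in bid]
--     sorted_ranks = sorted(ranks)
--     if sorted_ranks == [0, 0, 0]:
--         ret = 30
--     elif sorted_ranks == [0, 0, 2]:
--         ret = [36, None, 18][ranks[bid.index(me)]]
--     elif sorted_ranks == [0, 1, 1]:
--         ret = [36, 27][ranks[bid.index(me)]]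
--     elif sorted_ranks == [0, 1, 2]:
--         ret = [40, 30, 20][ranks[bid.index(me)]]
--     elif sorted_ranks == [0, 0]:
--         ret = 5
--     elif sorted_ranks == [0, 1]:
--         ret = [6, 4][ranks[bid.index(me)]]
--     else:
--         raise NotImplementedError
--     buy_result_cache[(bid, me)] = ret
--     return ret
-- ===== SOURCE B (Python) =====
-- def buy_result(bid, me):
--     # Arithmetic formulation: payout is a linear function of the caller's rank r,
--     # the position of me in the descending sort (6-2r for pairs, 40-10r for triples);
--     # an all-equal tuple splits the pot (10 or 90) evenly, and any partial tie in a
--     # triple costs every player 10% of the linear payout (base*9//10).  No per-element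
--     # rank list, no sorted-pattern dispatch, no payout tables.
--     # (A also memoizes in a module dict; return values match.)
--     n = len(bid)
--     if n == 2:
--         if bid[0] == bid[1]:
--             return 10 // n
--         return 6 - 2 * sorted(bid, reverse=True).index(me)
--     if n == 3:
--         distinct = len(set(bid))
--         if distinct == 1:
--             return 90 // n
--         base = 40 - 10 * sorted(bid, reverse=True).index(me)
--         return base if distinct == 3 else base * 9 // 10
--     raise NotImplementedError
-- ===== Notes on version B (the rewrite author's own statement) =====
-- stated objective: alternative
-- what changed: B replaces A's per-element rank list, its sort of that list and the sorted-pattern dispatch into hard-coded payout tables by a closed arithmetic formula: payout = 6-2r (pairs) / 40-10r (triples) of the caller's descending-sort rank r, with an all-equal tuple splitting the pot (10//n, 90//n) and any partial tie in a triple deducting 10% (base*9//10); A's memoization dict is a side effect only, return values are identical.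
import Mathlib
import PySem

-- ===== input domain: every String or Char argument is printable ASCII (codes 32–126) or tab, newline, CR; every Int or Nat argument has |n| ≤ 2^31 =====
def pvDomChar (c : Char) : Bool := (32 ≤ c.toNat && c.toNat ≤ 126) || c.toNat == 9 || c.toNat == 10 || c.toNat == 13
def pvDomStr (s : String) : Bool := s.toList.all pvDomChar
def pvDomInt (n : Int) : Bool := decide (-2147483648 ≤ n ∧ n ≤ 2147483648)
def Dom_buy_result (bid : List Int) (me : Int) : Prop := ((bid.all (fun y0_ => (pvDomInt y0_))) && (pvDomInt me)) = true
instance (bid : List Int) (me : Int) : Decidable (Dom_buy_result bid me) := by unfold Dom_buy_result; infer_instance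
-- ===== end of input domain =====

-- B replaces A's rank list + sort + sorted-pattern payout tables by a closed arithmetic
-- formula in the caller's descending-sort rank r (6-2r for pairs, 40-10r for triples,
-- pot split when all equal, a 10% deduction for a partial tie); B drops A's module-level memoization dict (a side effect only;
-- return values are unaffected).

-- ===== PORT A =====
-- ranks[bid.index(me)] looked up in a payout table (table entries are Option Int since one is None);
-- `none` stands both for a raising path (excluded by Pre_) and for the Python value None.
def buy_result_pick (bid ranks : List Int) (me : Int) (table : List (Option Int)) : Option Int :=
  match PySem.List.index? bid me with
  | none => none                       -- ValueError: me not in bid (outside Pre_)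
  | some i =>
    match PySem.List.pyGet? ranks (i : Int) with
    | none => none
    | some r => (PySem.List.pyGet? table r).join

def buy_result (bid : List Int) (me : Int) : Option Int :=
  -- the module-level cache only memoizes identical return values; it is not modelled
  let ranks := bid.map (fun x => (bid.map (fun y => if y > x then (1 : Int) else 0)).sum)
  let sorted_ranks := PySem.List.sorted ranks id
  if sorted_ranks = [0, 0, 0] then some 30
  else if sorted_ranks = [0, 0, 2] then buy_result_pick bid ranks me [some 36, none, some 18]
  else if sorted_ranks = [0, 1, 1] then buy_result_pick bid ranks me [some 36, some 27]
  else if sorted_ranks = [0, 1, 2] then buy_result_pick bid ranks me [some 40, some 30, some 20]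
  else if sorted_ranks = [0, 0] then some 5
  else if sorted_ranks = [0, 1] then buy_result_pick bid ranks me [some 6, some 4]
  else none                            -- NotImplementedError (outside Pre_)

-- ===== PORT B =====
-- sorted(bid, reverse=True).index(me): the caller's rank in the descending sort;
-- `none` stands for the raising ValueError path (me not in bid, excluded by Pre_)
def buy_result_alt_r (bid : List Int) (me : Int) : Option Int :=
  (PySem.List.index? (PySem.List.sorted bid id true) me).map (fun r => (r : Int))

def buy_result_alt (bid : List Int) (me : Int) : Option Int :=
  if bid.length = 2 then
    match PySem.List.pyGet? bid 0, PySem.List.pyGet? bid 1 with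
    | some b0, some b1 =>
      if b0 = b1 then some (PySem.Int.floordiv 10 2)
      else (buy_result_alt_r bid me).map (fun r => 6 - 2 * r)
    | _, _ => none
  else if bid.length = 3 then
    let distinct : Int := PySem.Set.len (PySem.Set.ofList bid)
    if distinct = 1 then some (PySem.Int.floordiv 90 3)
    else
      (buy_result_alt_r bid me).map (fun r =>
        let base := 40 - 10 * r
        if distinct = 3 then base else PySem.Int.floordiv (base * 9) 10)
  else none                            -- NotImplementedError (outside Pre_)

-- ===== PRECONDITION & SPEC =====
-- A raises NotImplementedError unless the tuple has length 2 or 3, and raises ValueError at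
-- bid.index(me) when me is absent and the bids are not all equal; Pre_ excludes exactly those.
def Pre_buy_result (bid : List Int) (me : Int) : Prop :=
  (bid.length = 2 ∨ bid.length = 3) ∧ (me ∈ bid ∨ ∀ x ∈ bid, x = bid.headD 0)
instance (bid : List Int) (me : Int) : Decidable (Pre_buy_result bid me) := by
  unfold Pre_buy_result; infer_instance
def pvWitness_buy_result : List Int × Int := ([3, 1, 2], 2)
def Spec_buy_result (bid : List Int) (me : Int) (out : Option Int) : Prop := out = buy_result_alt bid me
instance (bid : List Int) (me : Int) (out : Option Int) : Decidable (Spec_buy_result bid me out) := by unfold Spec_buy_result; infer_instance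

-- ===== CLAIM (what is proved, stated in full; the proofs are below) =====
def Claim_equal_buy_result : Prop := ∀ (bid : List Int) (me : Int), Dom_buy_result bid me → Pre_buy_result bid me → Spec_buy_result bid me (buy_result bid me)

-- ===== LEMMAS AND PROOFS =====

-- the length-3 case: fix which position me occupies, then split on the order type of (a, b, c)
set_option maxHeartbeats 2000000 in
theorem buy_result_eq_alt_three (a b c me : Int) (hme : me = a ∨ me = b ∨ me = c) :
    buy_result [a, b, c] me = buy_result_alt [a, b, c] me := by
  rcases hme with hme | hme | hme <;>
    rcases lt_trichotomy a b with h1 | h1 | h1 <;>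
    rcases lt_trichotomy a c with h2 | h2 | h2 <;>
    rcases lt_trichotomy b c with h3 | h3 | h3 <;>
    first
      | (exfalso; omega)
      | simp_all [buy_result, buy_result_alt, buy_result_pick, buy_result_alt_r,
          PySem.List.sorted, PySem.List.insertBy, PySem.List.index?, List.idxOf?,
          List.findIdx?, List.findIdx?.go, PySem.List.pyGet?, PySem.List.pyIdx?,
          PySem.Set.len, PySem.Set.ofList, PySem.Set.add, PySem.Set.contains,
          PySem.Int.floordiv, lt_asymm, le_of_lt, ne_of_gt, ne_of_lt]

-- the length-2 case
set_option maxHeartbeats 1000000 in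
theorem buy_result_eq_alt_two (a b me : Int) (hme : me = a ∨ me = b) :
    buy_result [a, b] me = buy_result_alt [a, b] me := by
  rcases hme with hme | hme <;>
    rcases lt_trichotomy a b with h1 | h1 | h1 <;>
    simp_all [buy_result, buy_result_alt, buy_result_pick, buy_result_alt_r,
      PySem.List.sorted, PySem.List.insertBy, PySem.List.index?, List.idxOf?,
      List.findIdx?, List.findIdx?.go, PySem.List.pyGet?, PySem.List.pyIdx?,
      PySem.Int.floordiv, lt_asymm, le_of_lt, ne_of_gt, ne_of_lt]

theorem buy_result_eq_alt (bid : List Int) (me : Int) (hpre : Pre_buy_result bid me) :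
    buy_result bid me = buy_result_alt bid me := by
  obtain ⟨hlen, hme⟩ := hpre
  rcases hlen with h2 | h3
  · match bid, h2 with
    | [a, b], _ =>
      rcases hme with hme | hall
      · simp only [List.mem_cons, List.not_mem_nil, or_false] at hme
        exact buy_result_eq_alt_two a b me hme
      · have hb := hall b (by simp)
        simp only [List.headD] at hb
        subst hb
        simp [buy_result, buy_result_alt, PySem.List.sorted, PySem.List.insertBy,
          PySem.List.pyGet?, PySem.List.pyIdx?, PySem.Int.floordiv]
  · match bid, h3 with
    | [a, b, c], _ =>
      rcases hme with hme | hall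
      · simp only [List.mem_cons, List.not_mem_nil, or_false] at hme
        exact buy_result_eq_alt_three a b c me hme
      · have hb := hall b (by simp)
        have hc := hall c (by simp)
        simp only [List.headD] at hb hc
        subst hb; subst hc
        simp [buy_result, buy_result_alt, PySem.List.sorted, PySem.List.insertBy,
          PySem.Set.len, PySem.Set.ofList, PySem.Set.add, PySem.Set.contains,
          PySem.Int.floordiv]

-- ===== VERDICT (by name: the statement is the Claim_ definition above) =====
theorem buy_result_spec : Claim_equal_buy_result := by
  intro bid me _ hpre
  unfold Spec_buy_result
  exact buy_result_eq_alt bid me hpre
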